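-- pv_equiv track=rewrite | github.com/cecileDo/TPHadoop | reducer_flickr.py | get_list_best_tag_by_country
-- ===== SOURCE A (Python) =====
-- k=4
--
-- def get_list_best_tag_by_country (data_dict):
--     """
--     take a list of tag by contry return only k best tags by contry
--     """
--     res_dict = dict()
--     for  country, tags in data_dict.items():
--         # get all tag for contry
--         lst_tag = list(dict.fromkeys(tags))
--         nb_val_tag = [None] * len(lst_tag)
--         for i in range(len(lst_tag)):
--             nb_val_tag[i]=tags.count(lst_tag[i])
--         sorted_lst_tag = [x for _,x in sorted(zip(nb_val_tag,lst_tag), reverse=True)]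
--         #take k first one
--         res_dict[country] = ' '.join(sorted_lst_tag[:k])
--     return res_dict
-- ===== SOURCE B (Python) =====
-- k = 4
--
-- def get_list_best_tag_by_country(data_dict):
--     """
--     take a list of tag by contry return only k best tags by contry
--     """
--     res_dict = dict()
--     for country, tags in data_dict.items():
--         # one-pass frequency table instead of dedup + repeated tags.count
--         cnt = {}
--         for t in tags:
--             cnt[t] = cnt.get(t, 0) + 1
--         pairs = [(c, t) for t, c in cnt.items()]
--         # top-k by repeated max extraction (k is a small constant) — no sort
--         best = []
--         while pairs and len(best) < k:
--             m = max(pairs)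
--             best.append(m[1])
--             pairs = [p for p in pairs if p != m]
--         res_dict[country] = ' '.join(best)
--     return res_dict
-- ===== Notes on version B (the rewrite author's own statement) =====
-- stated objective: alternative
-- what changed: B replaces A's dedup-then-per-tag tags.count counting and full descending sort by a one-pass frequency dict and top-k (k=4) selection via repeated max extraction, so no sort is performed.
import Mathlib
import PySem

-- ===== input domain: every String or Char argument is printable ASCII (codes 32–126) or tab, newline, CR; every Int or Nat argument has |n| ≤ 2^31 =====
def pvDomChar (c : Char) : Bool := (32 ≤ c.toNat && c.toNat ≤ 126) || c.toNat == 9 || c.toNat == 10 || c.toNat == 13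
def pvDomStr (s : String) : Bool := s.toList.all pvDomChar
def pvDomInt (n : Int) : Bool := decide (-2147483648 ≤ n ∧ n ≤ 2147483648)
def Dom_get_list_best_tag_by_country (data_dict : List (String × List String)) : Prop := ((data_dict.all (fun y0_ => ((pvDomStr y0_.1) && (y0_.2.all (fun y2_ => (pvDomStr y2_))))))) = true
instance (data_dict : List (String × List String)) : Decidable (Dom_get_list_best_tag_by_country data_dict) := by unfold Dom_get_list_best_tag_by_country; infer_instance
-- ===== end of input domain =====

-- B replaces A's dedup + quadratic per-tag tags.count by a one-pass frequency dict and picks the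
-- top k=4 (count, tag) pairs by repeated max extraction instead of fully sorting (objective: alternative).

-- ===== PORT A =====
-- per-country body of A's loop: dedup, count each unique tag, sort (count, tag) pairs descending,
-- take the first k = 4 tags and join with spaces
def pvJoinTopA (tags : List String) : String :=
  let lst_tag := PySem.List.dedup tags
  let nb_val_tag := (PySem.List.pyRange 0 (PySem.List.len lst_tag)).map
      (fun i => ((tags.count (PySem.List.pyGetD lst_tag i "")) : Int))
  let sorted_lst_tag := (PySem.List.sorted2 (nb_val_tag.zip lst_tag) Prod.fst Prod.snd true).map Prod.snd
  PySem.Str.join " " (PySem.List.slice sorted_lst_tag none (some 4))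

def get_list_best_tag_by_country (data_dict : List (String × List String)) : List (String × String) :=
  (data_dict.foldl (fun (res : PySem.Dict String String) p => res.insert p.1 (pvJoinTopA p.2))
    PySem.Dict.empty).items

-- ===== PORT B =====
-- Source B's while loop: extract the max (count, tag) pair, keep its tag, filter it out; at most k = 4 rounds
def pvSelectTop : Nat → List (Int × String) → List String
  | 0, _ => []
  | _ + 1, [] => []
  | n + 1, p :: t =>
    match PySem.List.max2? (p :: t) Prod.fst Prod.snd with
    | some m => m.2 :: pvSelectTop n ((p :: t).filter (fun q => q != m))
    | none => []   -- unreachable: max2? of a nonempty list is some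

-- per-country body of Source B's loop: one-pass counter dict, then top-4 by repeated max extraction
def pvJoinTopB (tags : List String) : String :=
  let cnt := tags.foldl (fun (d : PySem.Dict String Int) t => d.insert t (d.getD t 0 + 1)) PySem.Dict.empty
  let pairs := cnt.items.map (fun p => (p.2, p.1))
  PySem.Str.join " " (pvSelectTop 4 pairs)

def get_list_best_tag_by_country_alt (data_dict : List (String × List String)) : List (String × String) :=
  (data_dict.foldl (fun (res : PySem.Dict String String) p => res.insert p.1 (pvJoinTopB p.2))
    PySem.Dict.empty).items

-- ===== PRECONDITION & SPEC =====
def Spec_get_list_best_tag_by_country (data_dict : List (String × List String)) (out : List (String × String)) : Prop := out = get_list_best_tag_by_country_alt data_dict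
instance (data_dict : List (String × List String)) (out : List (String × String)) : Decidable (Spec_get_list_best_tag_by_country data_dict out) := by unfold Spec_get_list_best_tag_by_country; infer_instance

-- ===== CLAIM (what is proved, stated in full; the proofs are below) =====
def Claim_equal_get_list_best_tag_by_country : Prop := ∀ (data_dict : List (String × List String)), Dom_get_list_best_tag_by_country data_dict → Spec_get_list_best_tag_by_country data_dict (get_list_best_tag_by_country data_dict)

-- ===== LEMMAS AND PROOFS =====

-- Python's lexicographic order on (count, tag) tuples
def pvLt (a b : Int × String) : Prop := a.1 < b.1 ∨ (a.1 = b.1 ∧ a.2 < b.2)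

theorem pvLt_irrefl (a : Int × String) : ¬ pvLt a a := by
  simp [pvLt]

theorem pvLt_trans {a b c : Int × String} (h1 : pvLt a b) (h2 : pvLt b c) : pvLt a c := by
  rcases h1 with h1 | ⟨h1, h1'⟩ <;> rcases h2 with h2 | ⟨h2, h2'⟩
  · exact Or.inl (h1.trans h2)
  · exact Or.inl (h2 ▸ h1)
  · exact Or.inl (h1 ▸ h2)
  · exact Or.inr ⟨h1.trans h2, h1'.trans h2'⟩

theorem pvLt_asymm {a b : Int × String} (h : pvLt a b) : ¬ pvLt b a := fun h' =>
  pvLt_irrefl a (pvLt_trans h h')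

theorem pvLt_connex {a b : Int × String} (hne : a ≠ b) (h : ¬ pvLt a b) : pvLt b a := by
  rcases lt_trichotomy a.1 b.1 with h1 | h1 | h1
  · exact absurd (Or.inl h1) h
  · rcases lt_trichotomy a.2 b.2 with h2 | h2 | h2
    · exact absurd (Or.inr ⟨h1, h2⟩) h
    · exact absurd (Prod.ext h1 h2) hne
    · exact Or.inr ⟨h1.symm, h2⟩
  · exact Or.inl h1

-- m < x ≤ a  ⇒  m < a
theorem pvLt_of_pvLt_of_not_pvLt {m x a : Int × String} (h1 : pvLt m x) (h2 : ¬ pvLt a x) :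
    pvLt m a := by
  by_cases hax : a = x
  · rw [hax]; exact h1
  · exact pvLt_trans h1 (pvLt_connex hax h2)

-- the boolean comparison sorted2/max2? use is exactly pvLt
theorem pvBLt_iff (a b : Int × String) :
    ((decide (a.1 < b.1) || (!decide (b.1 < a.1) && decide (a.2 < b.2))) = true) ↔ pvLt a b := by
  simp only [Bool.or_eq_true, Bool.and_eq_true, Bool.not_eq_true', decide_eq_true_eq,
    decide_eq_false_iff_not, pvLt]
  constructor
  · rintro (h | ⟨h1, h2⟩)
    · exact Or.inl h
    · rcases lt_trichotomy a.1 b.1 with hh | hh | hh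
      · exact Or.inl hh
      · exact Or.inr ⟨hh, h2⟩
      · exact absurd hh h1
  · rintro (h | ⟨h1, h2⟩)
    · exact Or.inl h
    · exact Or.inr ⟨by rw [h1]; exact lt_irrefl _, h2⟩

-- ---- sorted2 reverse is pairwise-≥, hence (Nodup) strictly descending ----

theorem insertBy_pairwise_pvGe (x : Int × String) (ys : List (Int × String))
    (h : ys.Pairwise (fun a b => ¬ pvLt a b)) :
    (PySem.List.insertBy (fun a b => decide (b.1 < a.1) || (!decide (a.1 < b.1) && decide (b.2 < a.2))) x ys).Pairwise
      (fun a b => ¬ pvLt a b) := by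
  induction ys with
  | nil => simp [PySem.List.insertBy]
  | cons y t ih =>
    rw [List.pairwise_cons] at h
    have hred : PySem.List.insertBy (fun a b => decide (b.1 < a.1) || (!decide (a.1 < b.1) && decide (b.2 < a.2))) x (y :: t) =
        if (decide (y.1 < x.1) || (!decide (x.1 < y.1) && decide (y.2 < x.2))) = true then x :: y :: t
        else y :: PySem.List.insertBy (fun a b => decide (b.1 < a.1) || (!decide (a.1 < b.1) && decide (b.2 < a.2))) x t := rfl
    rw [hred]
    by_cases hb : (decide (y.1 < x.1) || (!decide (x.1 < y.1) && decide (y.2 < x.2))) = true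
    · have hyx : pvLt y x := (pvBLt_iff y x).mp hb
      rw [if_pos hb]
      refine List.pairwise_cons.mpr ⟨?_, List.pairwise_cons.mpr h⟩
      intro z hz
      rcases List.mem_cons.mp hz with hz | hz
      · rw [hz]; exact pvLt_asymm hyx
      · intro hxz
        exact h.1 z hz (pvLt_trans hyx hxz)
    · have hyx : ¬ pvLt y x := fun hp => hb ((pvBLt_iff y x).mpr hp)
      rw [if_neg hb]
      refine List.pairwise_cons.mpr ⟨?_, ih h.2⟩
      intro z hz
      rcases (PySem.List.mem_insertBy _ x z t).mp hz with hz | hz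
      · rw [hz]; exact hyx
      · exact h.1 z hz

theorem foldl_insertBy_pairwise_pvGe (xs : List (Int × String)) (acc : List (Int × String))
    (h : acc.Pairwise (fun a b => ¬ pvLt a b)) :
    (xs.foldl (fun acc x => PySem.List.insertBy (fun a b => decide (b.1 < a.1) || (!decide (a.1 < b.1) && decide (b.2 < a.2))) x acc) acc).Pairwise
      (fun a b => ¬ pvLt a b) := by
  induction xs generalizing acc with
  | nil => exact h
  | cons x t ih => exact ih _ (insertBy_pairwise_pvGe x acc h)

theorem sorted2_rev_eq_foldl (ps : List (Int × String)) :
    PySem.List.sorted2 ps Prod.fst Prod.snd true =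
      ps.foldl (fun acc x => PySem.List.insertBy (fun a b => decide (b.1 < a.1) || (!decide (a.1 < b.1) && decide (b.2 < a.2))) x acc) [] := rfl

theorem sorted2_rev_pairwise_pvGe (ps : List (Int × String)) :
    (PySem.List.sorted2 ps Prod.fst Prod.snd true).Pairwise (fun a b => ¬ pvLt a b) := by
  rw [sorted2_rev_eq_foldl]
  exact foldl_insertBy_pairwise_pvGe ps [] (by simp)

theorem sorted2_rev_pairwise_pvGt (ps : List (Int × String)) (h : ps.Nodup) :
    (PySem.List.sorted2 ps Prod.fst Prod.snd true).Pairwise (fun a b => pvLt b a) := by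
  have hnd : (PySem.List.sorted2 ps Prod.fst Prod.snd true).Nodup :=
    (PySem.List.sorted2_perm ps Prod.fst Prod.snd true).nodup_iff.mpr h
  have := (sorted2_rev_pairwise_pvGe ps).and hnd
  exact this.imp (fun {a b} hab => pvLt_connex hab.2 hab.1)

theorem pairwise_pvGt_unique {l₁ l₂ : List (Int × String)} (hp : l₁.Perm l₂)
    (h1 : l₁.Pairwise (fun a b => pvLt b a)) (h2 : l₂.Pairwise (fun a b => pvLt b a)) : l₁ = l₂ :=
  List.Perm.eq_of_pairwise (fun _ _ _ _ hab hba => absurd hab (pvLt_asymm hba)) h1 h2 hp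

-- ---- max2? characterization ----

theorem pvMaxGen (f : Option (Int × String) → (Int × String) → Option (Int × String))
    (hf : ∀ (a x : Int × String), f (some a) x =
      if (decide (a.1 < x.1) || (!decide (x.1 < a.1) && decide (a.2 < x.2))) = true then some x else some a)
    (t : List (Int × String)) (p : Int × String) :
    ∃ m, t.foldl f (some p) = some m ∧ (m = p ∨ m ∈ t) ∧ ¬ pvLt m p ∧ ∀ y ∈ t, ¬ pvLt m y := by
  induction t generalizing p with
  | nil => exact ⟨p, rfl, Or.inl rfl, pvLt_irrefl p, by simp⟩
  | cons x t ih =>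
    rw [List.foldl_cons, hf p x]
    by_cases hb : (decide (p.1 < x.1) || (!decide (x.1 < p.1) && decide (p.2 < x.2))) = true
    · rw [if_pos hb]
      have hpx : pvLt p x := (pvBLt_iff p x).mp hb
      obtain ⟨m, hm, hmem, hdom, hall⟩ := ih x
      refine ⟨m, hm, ?_, ?_, ?_⟩
      · rcases hmem with h | h
        · exact Or.inr (by rw [h]; exact List.mem_cons_self)
        · exact Or.inr (List.mem_cons_of_mem x h)
      · exact fun hmp => hdom (pvLt_trans hmp hpx)
      · intro y hy
        rcases List.mem_cons.mp hy with hy | hy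
        · rw [hy]; exact hdom
        · exact hall y hy
    · rw [if_neg hb]
      have hpx : ¬ pvLt p x := fun hp => hb ((pvBLt_iff p x).mpr hp)
      obtain ⟨m, hm, hmem, hdom, hall⟩ := ih p
      refine ⟨m, hm, ?_, hdom, ?_⟩
      · rcases hmem with h | h
        · exact Or.inl h
        · exact Or.inr (List.mem_cons_of_mem x h)
      · intro y hy
        rcases List.mem_cons.mp hy with hy | hy
        · rw [hy]; exact fun hmx => hdom (pvLt_of_pvLt_of_not_pvLt hmx hpx)
        · exact hall y hy

theorem pvMaxGenCons (f : Option (Int × String) → (Int × String) → Option (Int × String))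
    (hf : ∀ (a x : Int × String), f (some a) x =
      if (decide (a.1 < x.1) || (!decide (x.1 < a.1) && decide (a.2 < x.2))) = true then some x else some a)
    (h0 : ∀ x, f none x = some x) (p : Int × String) (t : List (Int × String)) :
    ∃ m, (p :: t).foldl f none = some m ∧ m ∈ (p :: t) ∧ ∀ y ∈ (p :: t), ¬ pvLt m y := by
  rw [List.foldl_cons, h0 p]
  obtain ⟨m, hm, hmem, hdom, hall⟩ := pvMaxGen f hf t p
  refine ⟨m, hm, ?_, ?_⟩
  · rcases hmem with h | h
    · rw [h]; exact List.mem_cons_self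
    · exact List.mem_cons_of_mem p h
  · intro y hy
    rcases List.mem_cons.mp hy with hy | hy
    · rw [hy]; exact hdom
    · exact hall y hy

theorem pvMax2?_spec (p : Int × String) (t : List (Int × String)) :
    ∃ m, PySem.List.max2? (p :: t) Prod.fst Prod.snd = some m ∧ m ∈ (p :: t) ∧
      ∀ y ∈ (p :: t), ¬ pvLt m y := by
  unfold PySem.List.max2?
  exact pvMaxGenCons _ (fun a x => rfl) (fun x => rfl) p t

-- ---- the core lemma: take-n of the reverse sort = n rounds of max extraction ----

theorem pvTake_sorted_eq_select (n : Nat) : ∀ (ps : List (Int × String)), ps.Nodup →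
    ((PySem.List.sorted2 ps Prod.fst Prod.snd true).take n).map Prod.snd = pvSelectTop n ps := by
  induction n with
  | zero => intro ps _; simp [pvSelectTop]
  | succ n ih =>
    intro ps hnd
    match ps with
    | [] => simp [pvSelectTop, sorted2_rev_eq_foldl]
    | p :: t =>
      obtain ⟨m, hm, hmem, hdom⟩ := pvMax2?_spec p t
      have hfilter : (p :: t).filter (fun q => q != m) = (p :: t).erase m :=
        (List.Nodup.erase_eq_filter hnd m).symm
      have hFnd : ((p :: t).filter (fun q => q != m)).Nodup := hnd.filter _
      have hperm : (m :: PySem.List.sorted2 ((p :: t).filter (fun q => q != m)) Prod.fst Prod.snd true).Perm (p :: t) := by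
        refine List.Perm.trans (List.Perm.cons m (PySem.List.sorted2_perm _ _ _ _)) ?_
        rw [hfilter]
        exact (List.perm_cons_erase hmem).symm
      have hpair : (m :: PySem.List.sorted2 ((p :: t).filter (fun q => q != m)) Prod.fst Prod.snd true).Pairwise
          (fun a b => pvLt b a) := by
        refine List.pairwise_cons.mpr ⟨?_, sorted2_rev_pairwise_pvGt _ hFnd⟩
        intro y hy
        have hyF : y ∈ (p :: t).filter (fun q => q != m) :=
          ((PySem.List.sorted2_perm _ _ _ _).mem_iff).mp hy
        have hy' := List.mem_filter.mp hyF
        have hyne : y ≠ m := by simpa using hy'.2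
        exact pvLt_connex (Ne.symm hyne) (hdom y hy'.1)
      have hsorted : PySem.List.sorted2 (p :: t) Prod.fst Prod.snd true =
          m :: PySem.List.sorted2 ((p :: t).filter (fun q => q != m)) Prod.fst Prod.snd true :=
        pairwise_pvGt_unique ((PySem.List.sorted2_perm _ _ _ _).trans hperm.symm)
          (sorted2_rev_pairwise_pvGt _ hnd) hpair
      rw [hsorted]
      show (m.2 :: ((PySem.List.sorted2 _ Prod.fst Prod.snd true).take n).map Prod.snd) = _
      rw [ih _ hFnd]
      show _ = pvSelectTop (n + 1) (p :: t)
      simp only [pvSelectTop, hm]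

-- ---- the two per-country bodies agree ----

theorem pvPairsA_eq (tags : List String) :
    (((PySem.List.pyRange 0 (PySem.List.len (PySem.List.dedup tags))).map
        (fun i => ((tags.count (PySem.List.pyGetD (PySem.List.dedup tags) i "")) : Int))).zip
      (PySem.List.dedup tags)) =
      (PySem.List.dedup tags).map (fun t => ((tags.count t : Int), t)) := by
  have h1 : (PySem.List.pyRange 0 (PySem.List.len (PySem.List.dedup tags))).map
      (fun i => ((tags.count (PySem.List.pyGetD (PySem.List.dedup tags) i "")) : Int)) =
      (PySem.List.dedup tags).map (fun t => (tags.count t : Int)) := by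
    rw [show (fun i => ((tags.count (PySem.List.pyGetD (PySem.List.dedup tags) i "")) : Int)) =
        ((fun t => (tags.count t : Int)) ∘ (fun j => PySem.List.pyGetD (PySem.List.dedup tags) j "")) from rfl,
      ← List.map_map, PySem.List.map_pyGetD_pyRange_zero]
  rw [h1]
  have h2 := @List.zip_map' String Int String (fun t => (tags.count t : Int)) id (PySem.List.dedup tags)
  simpa using h2

theorem pvPairsB_eq (tags : List String) :
    ((tags.foldl (fun (d : PySem.Dict String Int) t => d.insert t (d.getD t 0 + 1))
        PySem.Dict.empty).items.map (fun p => (p.2, p.1))) =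
      (PySem.List.dedup tags).map (fun t => ((tags.count t : Int), t)) := by
  rw [PySem.Dict.foldl_insert_getD_add_one_eq_counter, PySem.Dict.items_counter,
    List.map_map, PySem.List.dedup_eq_ofList]
  rfl

theorem pvPairs_nodup (tags : List String) :
    ((PySem.List.dedup tags).map (fun t => ((tags.count t : Int), t))).Nodup := by
  rw [PySem.List.dedup_eq_ofList]
  exact (PySem.Set.nodup_ofList tags).map (fun a b h => congrArg Prod.snd h)

theorem pvSlice4 (l : List String) : PySem.List.slice l none (some 4) = l.take 4 := by
  simpa using PySem.List.slice_to_natCast l 4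

theorem pvJoinTop_eq (tags : List String) : pvJoinTopA tags = pvJoinTopB tags := by
  simp only [pvJoinTopA, pvJoinTopB]
  rw [pvSlice4, pvPairsA_eq, pvPairsB_eq, ← List.map_take,
    pvTake_sorted_eq_select 4 _ (pvPairs_nodup tags)]

-- ===== VERDICT (by name: the statement is the Claim_ definition above) =====
theorem get_list_best_tag_by_country_spec : Claim_equal_get_list_best_tag_by_country := by
  intro data_dict _
  unfold Spec_get_list_best_tag_by_country get_list_best_tag_by_country get_list_best_tag_by_country_alt
  have hfun : (fun (res : PySem.Dict String String) (p : String × List String) =>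
      res.insert p.1 (pvJoinTopA p.2)) = (fun res p => res.insert p.1 (pvJoinTopB p.2)) := by
    funext res p
    rw [pvJoinTop_eq]
  rw [hfun]
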